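-- pv_equiv track=rewrite | github.com/gotteeth/reviwes | task1.py | keyword_highlighter
-- ===== SOURCE A (Python) =====
-- def keyword_highlighter(reviews):
--     keywords = ["good", "excellent", "bad", "poor", "average"]
--     highlighted_reviews = []
--
--     for review in reviews:
--         for keyword in keywords:
--             if keyword in review.lower():
--                 review = review.replace(keyword, keyword.upper())
--         highlighted_reviews.append(review)
--
--     return highlighted_reviews
-- ===== SOURCE B (Python) =====
-- def _highlight(review):
--     keywords = ["good", "excellent", "bad", "poor", "average"]
--     parts = []
--     i = 0
--     n = len(review)
--     while i < n:
--         for kw in keywords: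
--             if review.startswith(kw, i):
--                 parts.append(kw.upper())
--                 i += len(kw)
--                 break
--         else:
--             parts.append(review[i])
--             i += 1
--     return "".join(parts)
--
--
-- def keyword_highlighter(reviews):
--     return [_highlight(review) for review in reviews]
-- ===== Notes on version B (the rewrite author's own statement) =====
-- stated objective: alternative
-- what changed: A runs five sequential full-string str.replace passes (each preceded by a redundant case-insensitive membership check); B makes a single left-to-right scan of each review, at each position emitting the uppercase form of the keyword that starts there (and jumping past it) or copying the character.
-- outside the precondition, e.g. on keyword_highlighter(['averagexcellent']): A returns ['averagEXCELLENT'], B returns ['AVERAGExcellent']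
import Mathlib
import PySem

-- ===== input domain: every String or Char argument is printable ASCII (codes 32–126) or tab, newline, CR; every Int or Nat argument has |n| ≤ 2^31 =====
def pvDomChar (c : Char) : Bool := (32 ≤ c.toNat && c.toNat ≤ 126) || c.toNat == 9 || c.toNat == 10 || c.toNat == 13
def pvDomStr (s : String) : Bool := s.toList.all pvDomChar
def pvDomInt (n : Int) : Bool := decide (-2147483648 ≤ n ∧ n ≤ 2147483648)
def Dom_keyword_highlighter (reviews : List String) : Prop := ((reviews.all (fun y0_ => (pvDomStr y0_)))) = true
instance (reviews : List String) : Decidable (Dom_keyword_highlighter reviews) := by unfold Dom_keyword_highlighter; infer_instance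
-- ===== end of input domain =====

-- B replaces A's five sequential full-string replace passes by ONE left-to-right scan per review
-- (at each position try the keywords, emit the uppercase match and jump, else copy the char); objective: alternative single-pass algorithm.

-- ===== PORT A =====
def keyword_highlighter (reviews : List String) : List String :=
  let keywords : List String := ["good", "excellent", "bad", "poor", "average"]
  reviews.foldl (fun highlighted_reviews review =>
    highlighted_reviews ++ [keywords.foldl (fun review keyword =>
      if PySem.Str.isIn keyword (PySem.Str.lower review) then
        PySem.Str.replace review keyword (PySem.Str.upper keyword)
      else review) review]) []

-- ===== PORT B =====
-- Source B's while-loop scanner over one review (recursion on the remaining characters = the loop on i),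
-- with the for-kw-in-keywords/break inner loop unrolled in keyword-list order.

def hlChars : List Char → List Char
  | [] => []
  | c :: t =>
    if List.isPrefixOf ['g','o','o','d'] (c :: t) then ['G','O','O','D'] ++ hlChars (t.drop 3)
    else if List.isPrefixOf ['e','x','c','e','l','l','e','n','t'] (c :: t) then ['E','X','C','E','L','L','E','N','T'] ++ hlChars (t.drop 8)
    else if List.isPrefixOf ['b','a','d'] (c :: t) then ['B','A','D'] ++ hlChars (t.drop 2)
    else if List.isPrefixOf ['p','o','o','r'] (c :: t) then ['P','O','O','R'] ++ hlChars (t.drop 3)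
    else if List.isPrefixOf ['a','v','e','r','a','g','e'] (c :: t) then ['A','V','E','R','A','G','E'] ++ hlChars (t.drop 6)
    else c :: hlChars t
termination_by s => s.length
decreasing_by all_goals simp


def keyword_highlighter_alt (reviews : List String) : List String :=
  reviews.map (fun review => String.ofList (hlChars review.toList))

-- ===== PRECONDITION & SPEC =====
-- Pre_ excludes reviews containing the overlapping substring "averagexcellent" (an "average" occurrence whose
-- final 'e' also starts "excellent" — the one possible overlap among the five keywords): there A's keyword-list
-- order uppercases "excellent" while B's left-to-right scan uppercases "average" first, and both choices are
-- defensible on this unspecified tie.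
def Pre_keyword_highlighter (reviews : List String) : Prop :=
  ∀ r ∈ reviews, PySem.Str.isIn "averagexcellent" r = false
instance (reviews : List String) : Decidable (Pre_keyword_highlighter reviews) := by unfold Pre_keyword_highlighter; infer_instance

def pvWitness_keyword_highlighter : List String := ["This is good, not Bad.", "poor AND average service"]

def Spec_keyword_highlighter (reviews : List String) (out : List String) : Prop := out = keyword_highlighter_alt reviews
instance (reviews : List String) (out : List String) : Decidable (Spec_keyword_highlighter reviews out) := by unfold Spec_keyword_highlighter; infer_instance

-- ===== CLAIM (what is proved, stated in full; the proofs are below) =====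
def Claim_equal_keyword_highlighter : Prop := ∀ (reviews : List String), Dom_keyword_highlighter reviews → Pre_keyword_highlighter reviews → Spec_keyword_highlighter reviews (keyword_highlighter reviews)

-- ===== LEMMAS AND PROOFS =====
def wG : List Char := ['g','o','o','d']
def wE : List Char := ['e','x','c','e','l','l','e','n','t']
def wB : List Char := ['b','a','d']
def wP : List Char := ['p','o','o','r']
def wA : List Char := ['a','v','e','r','a','g','e']
def uG : List Char := ['G','O','O','D']
def uE : List Char := ['E','X','C','E','L','L','E','N','T']
def uB : List Char := ['B','A','D']
def uP : List Char := ['P','O','O','R']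
def uA : List Char := ['A','V','E','R','A','G','E']
def xcl : List Char := ['x','c','e','l','l','e','n','t']
def aeChars : List Char := ['a','v','e','r','a','g','e','x','c','e','l','l','e','n','t']
def scanOne (old new : List Char) : List Char → List Char
  | [] => []
  | c :: t =>
    if List.isPrefixOf old (c :: t) then new ++ scanOne old new (t.drop (old.length - 1))
    else c :: scanOne old new t
termination_by s => s.length
decreasing_by all_goals simp

theorem scanOne_nil (old new : List Char) : scanOne old new [] = [] := by rw [scanOne]

theorem scanOne_cons_neg {old : List Char} (new : List Char) {c : Char} {t : List Char}
    (h : ¬ old <+: (c :: t)) : scanOne old new (c :: t) = c :: scanOne old new t := by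
  rw [scanOne, if_neg]
  simp [List.isPrefixOf_iff_prefix, h]

theorem scanOne_prefix (old new r : List Char) (h : old ≠ []) :
    scanOne old new (old ++ r) = new ++ scanOne old new r := by
  obtain ⟨c, ot, rfl⟩ := List.exists_cons_of_ne_nil h
  rw [List.cons_append, scanOne]
  have hpre : (c :: ot) <+: (c :: (ot ++ r)) := ⟨r, by simp⟩
  simp only [List.isPrefixOf_iff_prefix, hpre, if_true]
  congr 1
  simp

theorem scanOne_id {old : List Char} (new : List Char) {s : List Char} (h : ¬ old <:+: s) :
    scanOne old new s = s := by
  induction s with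
  | nil => rw [scanOne]
  | cons c t ih =>
    have h1 : ¬ old <+: (c :: t) := fun hp => h hp.isInfix
    have h2 : ¬ old <:+: t := fun hi => h (hi.trans (List.suffix_cons c t).isInfix)
    rw [scanOne_cons_neg new h1, ih h2]

theorem scanOne_pres (new : List Char) (hnew : new ≠ []) :
    ∀ n old r w, r.length ≤ n → (∀ c ∈ new, c ∉ w) → w <+: scanOne old new r → w <+: r := by
  intro n
  induction n with
  | zero =>
    intro old r w hr _ hp
    have : r = [] := List.eq_nil_of_length_eq_zero (Nat.le_zero.mp hr)
    subst this; rw [scanOne_nil] at hp; simpa using hp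
  | succ n ih =>
    intro old r w hr H hp
    match r with
    | [] => rw [scanOne_nil] at hp; simpa using hp
    | c :: t =>
      by_cases hpre : old <+: (c :: t)
      · rw [scanOne] at hp
        simp only [List.isPrefixOf_iff_prefix, hpre, if_true] at hp
        match w with
        | [] => exact List.nil_prefix
        | d :: w' =>
          obtain ⟨e, new', rfl⟩ := List.exists_cons_of_ne_nil hnew
          rw [List.cons_append, List.cons_prefix_cons] at hp
          obtain ⟨rfl, -⟩ := hp
          exact absurd (by simp : d ∈ d :: w') (H d (by simp))
      · rw [scanOne_cons_neg new hpre] at hp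
        match w with
        | [] => exact List.nil_prefix
        | d :: w' =>
          rw [List.cons_prefix_cons] at hp
          obtain ⟨rfl, hp'⟩ := hp
          have : w' <+: t := ih old t w' (by simpa using hr) (fun a ha hb => H a ha (by simp [hb])) hp'
          exact List.cons_prefix_cons.mpr ⟨rfl, this⟩

theorem scanOne_append (old new u v : List Char) (h : ∀ j, j < u.length → ¬ old <+: (u.drop j ++ v)) :
    scanOne old new (u ++ v) = u ++ scanOne old new v := by
  induction u with
  | nil => simp
  | cons c u' ih =>
    rw [List.cons_append, scanOne_cons_neg new (fun hp => h 0 (by simp) (by simpa using hp)), ih]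
    · simp
    · intro j hj
      simpa using h (j+1) (by simpa using Nat.succ_lt_succ hj)

theorem win_head {u k : List Char} {c' : Char} {k' : List Char} (hk : k = c' :: k')
    (hu : ∀ ch ∈ u, ch ≠ c') : ∀ j, j < u.length → ∀ v, ¬ k <+: (u.drop j ++ v) := by
  intro j hj v hp
  rw [List.drop_eq_getElem_cons hj, hk, List.cons_append, List.cons_prefix_cons] at hp
  exact hu u[j] (List.getElem_mem hj) hp.1.symm

def fiveScans (s : List Char) : List Char :=
  scanOne wA uA (scanOne wP uP (scanOne wB uB (scanOne wE uE (scanOne wG uG s))))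

theorem skip_head (k' : List Char) (c' : Char) (t' : List Char) (hk : k' = c' :: t')
    (u : List Char) (hu : ∀ ch ∈ u, ch ≠ c') (new v : List Char) :
    scanOne k' new (u ++ v) = u ++ scanOne k' new v :=
  scanOne_append k' new u v (fun j hj => win_head hk hu j hj v)

theorem win_avg_good : ∀ j, j < wA.length → ∀ v, ¬ wG <+: (wA.drop j ++ v) := by
  intro j hj v
  simp only [wA, List.length_cons, List.length_nil] at hj
  have hj7 : j < 7 := by omega
  clear hj; interval_cases j <;> simp [wA, wG, List.cons_prefix_cons]

theorem win_avg_exc (v : List Char) (h : ¬ xcl <+: v) : ∀ j, j < wA.length → ¬ wE <+: (wA.drop j ++ v) := by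
  intro j hj
  simp only [wA, List.length_cons, List.length_nil] at hj
  have hj7 : j < 7 := by omega
  clear hj; interval_cases j <;> (simp [wA, wE, List.cons_prefix_cons]; try trivial)

-- hlChars computation lemmas
theorem hl_nil : hlChars [] = [] := by rw [hlChars]
theorem hl_g (r : List Char) : hlChars (wG ++ r) = uG ++ hlChars r := by
  rw [wG, List.cons_append, hlChars] ; simp [List.isPrefixOf, uG]
theorem hl_e (r : List Char) : hlChars (wE ++ r) = uE ++ hlChars r := by
  rw [wE, List.cons_append, hlChars] ; simp [List.isPrefixOf, uE]
theorem hl_b (r : List Char) : hlChars (wB ++ r) = uB ++ hlChars r := by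
  rw [wB, List.cons_append, hlChars] ; simp [List.isPrefixOf, uB]
theorem hl_p (r : List Char) : hlChars (wP ++ r) = uP ++ hlChars r := by
  rw [wP, List.cons_append, hlChars] ; simp [List.isPrefixOf, uP]
theorem hl_a (r : List Char) : hlChars (wA ++ r) = uA ++ hlChars r := by
  rw [wA, List.cons_append, hlChars] ; simp [List.isPrefixOf, uA]
theorem hl_neg {c : Char} {t : List Char} (h1 : ¬ wG <+: (c :: t)) (h2 : ¬ wE <+: (c :: t))
    (h3 : ¬ wB <+: (c :: t)) (h4 : ¬ wP <+: (c :: t)) (h5 : ¬ wA <+: (c :: t)) :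
    hlChars (c :: t) = c :: hlChars t := by
  rw [hlChars]
  simp only [wG, wE, wB, wP, wA] at h1 h2 h3 h4 h5
  simp [List.isPrefixOf_iff_prefix, h1, h2, h3, h4, h5]

theorem pres_t {new w t : List Char} (hnew : new ≠ []) (H : ∀ c ∈ new, c ∉ w) (old : List Char)
    (h : w <+: scanOne old new t) : w <+: t :=
  scanOne_pres new hnew t.length old t w le_rfl H h

theorem main_lemma : ∀ n s, s.length ≤ n → ¬ aeChars <:+: s → fiveScans s = hlChars s := by
  intro n
  induction n with
  | zero =>
    intro s hs _
    have : s = [] := List.eq_nil_of_length_eq_zero (Nat.le_zero.mp hs)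
    subst this
    simp [fiveScans, scanOne_nil, hl_nil]
  | succ n ih =>
    intro s hs hAE
    by_cases hg : wG <+: s
    · obtain ⟨r, rfl⟩ := hg
      have hr : r.length ≤ n := by simp [wG] at hs; omega
      have hAEr : ¬ aeChars <:+: r := fun hi => hAE (hi.trans (List.suffix_append wG r).isInfix)
      rw [hl_g]
      unfold fiveScans
      rw [scanOne_prefix wG uG r (by simp [wG]),
          skip_head wE 'e' _ rfl uG (by simp [uG]),
          skip_head wB 'b' _ rfl uG (by simp [uG]),
          skip_head wP 'p' _ rfl uG (by simp [uG]),
          skip_head wA 'a' _ rfl uG (by simp [uG])]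
      have := ih r hr hAEr
      unfold fiveScans at this
      rw [this]
    · by_cases he : wE <+: s
      · obtain ⟨r, rfl⟩ := he
        have hr : r.length ≤ n := by simp [wE] at hs; omega
        have hAEr : ¬ aeChars <:+: r := fun hi => hAE (hi.trans (List.suffix_append wE r).isInfix)
        rw [hl_e]
        unfold fiveScans
        rw [skip_head wG 'g' _ rfl wE (by simp [wE]),
            scanOne_prefix wE uE _ (by simp [wE]),
            skip_head wB 'b' _ rfl uE (by simp [uE]),
            skip_head wP 'p' _ rfl uE (by simp [uE]),
            skip_head wA 'a' _ rfl uE (by simp [uE])]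
        have := ih r hr hAEr
        unfold fiveScans at this
        rw [this]
      · by_cases hb : wB <+: s
        · obtain ⟨r, rfl⟩ := hb
          have hr : r.length ≤ n := by simp [wB] at hs; omega
          have hAEr : ¬ aeChars <:+: r := fun hi => hAE (hi.trans (List.suffix_append wB r).isInfix)
          rw [hl_b]
          unfold fiveScans
          rw [skip_head wG 'g' _ rfl wB (by simp [wB]),
              skip_head wE 'e' _ rfl wB (by simp [wB]),
              scanOne_prefix wB uB _ (by simp [wB]),
              skip_head wP 'p' _ rfl uB (by simp [uB]),
              skip_head wA 'a' _ rfl uB (by simp [uB])]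
          have := ih r hr hAEr
          unfold fiveScans at this
          rw [this]
        · by_cases hp : wP <+: s
          · obtain ⟨r, rfl⟩ := hp
            have hr : r.length ≤ n := by simp [wP] at hs; omega
            have hAEr : ¬ aeChars <:+: r := fun hi => hAE (hi.trans (List.suffix_append wP r).isInfix)
            rw [hl_p]
            unfold fiveScans
            rw [skip_head wG 'g' _ rfl wP (by simp [wP]),
                skip_head wE 'e' _ rfl wP (by simp [wP]),
                skip_head wB 'b' _ rfl wP (by simp [wP]),
                scanOne_prefix wP uP _ (by simp [wP]),
                skip_head wA 'a' _ rfl uP (by simp [uP])]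
            have := ih r hr hAEr
            unfold fiveScans at this
            rw [this]
          · by_cases ha : wA <+: s
            · obtain ⟨r, rfl⟩ := ha
              have hr : r.length ≤ n := by simp [wA] at hs; omega
              have hAEr : ¬ aeChars <:+: r := fun hi => hAE (hi.trans (List.suffix_append wA r).isInfix)
              rw [hl_a]
              unfold fiveScans
              have hxcl : ¬ xcl <+: scanOne wG uG r := by
                intro hx
                have hxr : xcl <+: r := pres_t (by simp [uG]) (by simp [uG, xcl]) wG hx
                obtain ⟨z, rfl⟩ := hxr
                exact hAE (List.IsPrefix.isInfix ⟨z, by simp [aeChars, wA, xcl]⟩)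
              rw [scanOne_append wG uG wA r (fun j hj => win_avg_good j hj r),
                  scanOne_append wE uE wA _ (fun j hj => win_avg_exc _ hxcl j hj),
                  skip_head wB 'b' _ rfl wA (by simp [wA]),
                  skip_head wP 'p' _ rfl wA (by simp [wA]),
                  scanOne_prefix wA uA _ (by simp [wA])]
              have := ih r hr hAEr
              unfold fiveScans at this
              rw [this]
            · match s with
              | [] => simp [fiveScans, scanOne_nil, hl_nil]
              | c :: t =>
                have ht : t.length ≤ n := by simpa using hs
                have hAEt : ¬ aeChars <:+: t := fun hi => hAE (hi.trans (List.suffix_cons c t).isInfix)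
                have hE2 : ¬ wE <+: (c :: scanOne wG uG t) := by
                  intro hpre
                  rw [show wE = 'e' :: xcl from rfl, List.cons_prefix_cons] at hpre
                  have h1 := hpre.1
                  have h2 : xcl <+: t := pres_t (by simp [uG]) (by simp [uG, xcl]) wG hpre.2
                  apply he
                  rw [show wE = 'e' :: xcl from rfl, List.cons_prefix_cons]
                  exact ⟨h1, h2⟩
                have hB2 : ¬ wB <+: (c :: scanOne wE uE (scanOne wG uG t)) := by
                  intro hpre
                  rw [show wB = 'b' :: ['a','d'] from rfl, List.cons_prefix_cons] at hpre
                  have h1 := hpre.1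
                  have h2 : (['a','d'] : List Char) <+: t :=
                    pres_t (by simp [uG]) (by simp [uG]) wG
                      (pres_t (by simp [uE]) (by simp [uE]) wE hpre.2)
                  apply hb
                  rw [show wB = 'b' :: ['a','d'] from rfl, List.cons_prefix_cons]
                  exact ⟨h1, h2⟩
                have hP2 : ¬ wP <+: (c :: scanOne wB uB (scanOne wE uE (scanOne wG uG t))) := by
                  intro hpre
                  rw [show wP = 'p' :: ['o','o','r'] from rfl, List.cons_prefix_cons] at hpre
                  have h1 := hpre.1
                  have h2 : (['o','o','r'] : List Char) <+: t :=
                    pres_t (by simp [uG]) (by simp [uG]) wG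
                      (pres_t (by simp [uE]) (by simp [uE]) wE
                        (pres_t (by simp [uB]) (by simp [uB]) wB hpre.2))
                  apply hp
                  rw [show wP = 'p' :: ['o','o','r'] from rfl, List.cons_prefix_cons]
                  exact ⟨h1, h2⟩
                have hA2 : ¬ wA <+: (c :: scanOne wP uP (scanOne wB uB (scanOne wE uE (scanOne wG uG t)))) := by
                  intro hpre
                  rw [show wA = 'a' :: ['v','e','r','a','g','e'] from rfl, List.cons_prefix_cons] at hpre
                  have h1 := hpre.1
                  have h2 : (['v','e','r','a','g','e'] : List Char) <+: t :=
                    pres_t (by simp [uG]) (by simp [uG]) wG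
                      (pres_t (by simp [uE]) (by simp [uE]) wE
                        (pres_t (by simp [uB]) (by simp [uB]) wB
                          (pres_t (by simp [uP]) (by simp [uP]) wP hpre.2)))
                  apply ha
                  rw [show wA = 'a' :: ['v','e','r','a','g','e'] from rfl, List.cons_prefix_cons]
                  exact ⟨h1, h2⟩
                rw [hl_neg hg he hb hp ha]
                unfold fiveScans
                rw [scanOne_cons_neg uG hg, scanOne_cons_neg uE hE2, scanOne_cons_neg uB hB2,
                    scanOne_cons_neg uP hP2, scanOne_cons_neg uA hA2]
                have := ih t ht hAEt
                unfold fiveScans at this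
                rw [this]

theorem goEq (old new : List Char) (hold : old ≠ []) :
    ∀ fuel l acc, l.length ≤ fuel →
      PySem.Chars.replace.go old new fuel l acc = acc.reverse ++ scanOne old new l := by
  intro fuel
  induction fuel with
  | zero =>
    intro l acc hl
    have : l = [] := List.eq_nil_of_length_eq_zero (Nat.le_zero.mp hl)
    subst this
    rw [PySem.Chars.replace.go, scanOne_nil]
  | succ n ih =>
    intro l acc hl
    match l with
    | [] =>
      rw [PySem.Chars.replace.go, scanOne_nil] <;> simp
    | c :: t =>
      have hl' : t.length ≤ n := by simpa using hl
      rw [PySem.Chars.replace.go, scanOne]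
      by_cases hp : old.isPrefixOf (c :: t)
      · simp only [hp, if_true]
        have hlen : old.length - 1 ≤ t.length := by
          have := (List.isPrefixOf_iff_prefix.mp hp).length_le
          simp at this
          omega
        have hdrop : List.drop old.length (c :: t) = List.drop (old.length - 1) t := by
          obtain ⟨d, od, rfl⟩ := List.exists_cons_of_ne_nil hold
          simp
        rw [hdrop, ih _ (new.reverse ++ acc) (by simp only [List.length_drop]; omega)]
        simp
      · simp only [hp]
        rw [ih _ (c :: acc) hl']
        simp

theorem replace_eq_scanOne (old new s : List Char) (h : old ≠ []) :
    PySem.Chars.replace s old new = scanOne old new s := by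
  rw [PySem.Chars.replace]
  simp only [List.isEmpty_iff, h, if_false]
  rw [goEq old new h s.length s [] le_rfl]
  simp

-- one guarded pass of A, at the character-list level
theorem stage_eq (k : String) (hk : k.toList ≠ []) (hlow : PySem.Chars.lower k.toList = k.toList)
    (cur : String) :
    (if PySem.Str.isIn k (PySem.Str.lower cur) then PySem.Str.replace cur k (PySem.Str.upper k)
     else cur).toList = scanOne k.toList (PySem.Chars.upper k.toList) cur.toList := by
  by_cases hin : PySem.Str.isIn k (PySem.Str.lower cur) = true
  · rw [if_pos hin]
    rw [PySem.Str.toList_replace, PySem.Str.toList_upper]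
    exact replace_eq_scanOne _ _ _ hk
  · rw [if_neg hin]
    have h' : PySem.Chars.isIn k.toList (PySem.Chars.lower cur.toList) = false := by
      simpa using (Bool.not_eq_true _).mp hin
    have hni : ¬ k.toList <:+: cur.toList := by
      intro hi
      exact (PySem.Chars.isIn_eq_false_iff _ _).mp h' (by
        have := List.IsInfix.map PySem.Chars.lowerChar hi
        rwa [show List.map PySem.Chars.lowerChar k.toList = PySem.Chars.lower k.toList from rfl,
             hlow] at this)
    exact (scanOne_id _ hni).symm

-- A's five guarded passes on one review equal B's single scan (on Pre_-admitted reviews)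
theorem review_eq (r : String) (hr : PySem.Str.isIn "averagexcellent" r = false) :
    (["good", "excellent", "bad", "poor", "average"].foldl (fun review keyword =>
      if PySem.Str.isIn keyword (PySem.Str.lower review) then
        PySem.Str.replace review keyword (PySem.Str.upper keyword)
      else review) r) = String.ofList (hlChars r.toList) := by
  apply String.toList_inj.mp
  simp only [List.foldl_cons, List.foldl_nil]
  rw [stage_eq "average" (by simp) rfl,
      stage_eq "poor" (by simp) rfl,
      stage_eq "bad" (by simp) rfl,
      stage_eq "excellent" (by simp) rfl,
      stage_eq "good" (by simp) rfl]
  have hAE : ¬ aeChars <:+: r.toList := by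
    have h' : PySem.Chars.isIn aeChars r.toList = false := by
      simpa using hr
    exact (PySem.Chars.isIn_eq_false_iff _ _).mp h'
  have := main_lemma r.toList.length r.toList le_rfl hAE
  unfold fiveScans at this
  rw [show ("good":String).toList = wG from rfl, show ("excellent":String).toList = wE from rfl,
      show ("bad":String).toList = wB from rfl, show ("poor":String).toList = wP from rfl,
      show ("average":String).toList = wA from rfl,
      show PySem.Chars.upper wG = uG from rfl, show PySem.Chars.upper wE = uE from rfl,
      show PySem.Chars.upper wB = uB from rfl, show PySem.Chars.upper wP = uP from rfl,
      show PySem.Chars.upper wA = uA from rfl, this]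
  simp

-- ===== VERDICT (by name: the statement is the Claim_ definition above) =====
theorem keyword_highlighter_spec : Claim_equal_keyword_highlighter := by
  intro reviews _ hpre
  unfold Spec_keyword_highlighter keyword_highlighter keyword_highlighter_alt
  rw [PySem.List.foldl_append_singleton_eq_map]
  simp only [List.nil_append]
  exact List.map_congr_left (fun r hrmem => review_eq r (hpre r hrmem))
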